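-- pv_equiv track=rewrite | github.com/anle0429/TensorTonic-Solutions | morphological-operations/morphological-operations.py | morphological_op
-- ===== SOURCE A (Python) =====
-- def morphological_op(image, kernel, operation):
--     """
--     Apply morphological erosion or dilation to a binary image.
--     """
--     rows = len(image)
--     cols = len(image[0])
--     k_rows = len(kernel)
--     k_cols = len(kernel[0])
--
--     pad_r = k_rows // 2
--     pad_c = k_cols // 2
--
--     padded = [[0] * (cols + 2 * pad_c) for _ in range(rows + 2 * pad_r)]
--     for i in range(rows):
--         for j in range(cols):
--             padded[i + pad_r][j + pad_c] = image[i][j]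
--
--     output = [[0] * cols for _ in range(rows)]
--
--     for i in range(rows):
--         for j in range(cols):
--             if operation == "erode":
--                 output[i][j] = 1
--                 for ki in range(k_rows):
--                     for kj in range(k_cols):
--                         if kernel[ki][kj] == 1:
--                             if padded[i + ki][j + kj] != 1:
--                                 output[i][j] = 0
--                                 break
--                     if output[i][j] == 0:
--                         break
--
--             elif operation == "dilate":
--                 output[i][j] = 0
--                 for ki in range(k_rows):
--                     for kj in range(k_cols):
--                         if kernel[ki][kj] == 1:
--                             if padded[i + ki][j + kj] == 1:
--                                 output[i][j] = 1
--                                 break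
--                     if output[i][j] == 1:
--                         break
--
--     return output
-- ===== SOURCE B (Python) =====
-- def morphological_op(image, kernel, operation):
--     """Apply morphological erosion or dilation to a binary image (scatter algorithm)."""
--     rows, cols = len(image), len(image[0])
--     k_rows, k_cols = len(kernel), len(kernel[0])
--     pad_r, pad_c = k_rows // 2, k_cols // 2
--     ones = [(ki - pad_r, kj - pad_c)
--             for ki in range(k_rows) for kj in range(k_cols)
--             if kernel[ki][kj] == 1]
--
--     if operation == "dilate":
--         # scatter: each 1-pixel of the image stamps 1s at the reflected kernel positions
--         out = [[0] * cols for _ in range(rows)]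
--         for ii in range(rows):
--             for jj in range(cols):
--                 if image[ii][jj] == 1:
--                     for di, dj in ones:
--                         r, c = ii - di, jj - dj
--                         if 0 <= r < rows and 0 <= c < cols:
--                             out[r][c] = 1
--         return out
--
--     if operation == "erode":
--         if not ones:
--             return [[1] * cols for _ in range(rows)]
--         # border band where the window leaves the image can never survive erosion
--         min_r = min(d for d, _ in ones)
--         max_r = max(d for d, _ in ones)
--         min_c = min(d for _, d in ones)
--         max_c = max(d for _, d in ones)
--         out = [[1 if 0 <= i + min_r and i + max_r < rows
--                      and 0 <= j + min_c and j + max_c < cols else 0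
--                 for j in range(cols)] for i in range(rows)]
--         # scatter: each non-1 pixel of the image stamps 0s at the reflected kernel positions
--         for ii in range(rows):
--             for jj in range(cols):
--                 if image[ii][jj] != 1:
--                     for di, dj in ones:
--                         r, c = ii - di, jj - dj
--                         if 0 <= r < rows and 0 <= c < cols:
--                             out[r][c] = 0
--         return out
--
--     return [[0] * cols for _ in range(rows)]
-- ===== Notes on version B (the rewrite author's own statement) =====
-- stated objective: alternative
-- what changed: B replaces A's output-driven gather over a padded buffer with an input-driven scatter: dilation iterates over the image's 1-pixels and stamps the reflected kernel into a zero grid; erosion starts from an all-ones grid with the out-of-window border band zeroed via the kernel offsets' min/max and lets every non-1 pixel stamp zeros; no padded copy is built and only the kernel's 1-cells and the kept pixels are visited.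
-- outside the precondition, e.g. on morphological_op([[1]], [[1], []], 'x'): A returns [[0]], B raises IndexError
import Mathlib
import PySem

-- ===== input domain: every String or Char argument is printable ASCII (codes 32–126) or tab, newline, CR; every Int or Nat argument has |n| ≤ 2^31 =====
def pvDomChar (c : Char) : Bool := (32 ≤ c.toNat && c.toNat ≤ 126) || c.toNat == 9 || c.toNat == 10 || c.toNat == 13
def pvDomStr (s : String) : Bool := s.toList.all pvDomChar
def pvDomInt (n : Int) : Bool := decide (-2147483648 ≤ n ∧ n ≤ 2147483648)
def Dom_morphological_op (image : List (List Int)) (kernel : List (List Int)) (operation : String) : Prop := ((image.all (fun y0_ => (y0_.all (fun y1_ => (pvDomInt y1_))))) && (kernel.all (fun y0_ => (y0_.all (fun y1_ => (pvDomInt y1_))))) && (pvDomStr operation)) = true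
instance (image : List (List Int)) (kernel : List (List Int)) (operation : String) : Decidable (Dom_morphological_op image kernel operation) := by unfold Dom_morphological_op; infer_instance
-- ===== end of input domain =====

-- B replaces A's output-driven gather over a padded buffer with an input-driven scatter:
-- dilation stamps the reflected kernel from each 1-pixel into a zero grid; erosion starts
-- from an all-ones grid with the out-of-window border band zeroed (via the kernel offsets'
-- min/max) and lets every non-1 pixel stamp zeros.  Objective: alternative algorithm.

-- ===== PORT A =====
-- A's inner `for kj: … break` loop: true as soon as pred fires, else false at the end
def pvInnerA (pred : Nat → Bool) : List Nat → Bool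
  | [] => false
  | kj :: rest => if pred kj then true else pvInnerA pred rest

-- A's outer `for ki: … break` loop: output starts at init, becomes flip (and stops) when inner fires
def pvOuterA (inner : Nat → Bool) (init flip : Int) : List Nat → Int
  | [] => init
  | ki :: rest => if inner ki then flip else pvOuterA inner init flip rest

-- A's padded buffer: zero matrix of size (rows+2*pad_r)×(cols+2*pad_c), the image copied in
-- by the same double loop (padded[i+pad_r][j+pad_c] = image[i][j])
def pvPadded (image : List (List Int)) (rows cols pad_r pad_c : Nat) : List (List Int) :=
  (List.range rows).foldl (fun p i =>
      (List.range cols).foldl (fun q j =>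
        q.modify (i + pad_r) (fun rw => rw.set (j + pad_c) ((image.getD i []).getD j 0))) p)
    (List.replicate (rows + 2*pad_r) (List.replicate (cols + 2*pad_c) (0:Int)))

def morphological_op (image : List (List Int)) (kernel : List (List Int)) (operation : String) : List (List Int) :=
  let rows := image.length
  let cols := (image.headD []).length
  let k_rows := kernel.length
  let k_cols := (kernel.headD []).length
  let pad_r := k_rows / 2
  let pad_c := k_cols / 2
  let padded := pvPadded image rows cols pad_r pad_c
  (List.range rows).map (fun i => (List.range cols).map (fun j =>
    if operation == "erode" then
      pvOuterA (fun ki => pvInnerA (fun kj =>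
          (kernel.getD ki []).getD kj 0 == 1 && !(((padded.getD (i+ki) []).getD (j+kj) 0) == 1))
        (List.range k_cols)) 1 0 (List.range k_rows)
    else if operation == "dilate" then
      pvOuterA (fun ki => pvInnerA (fun kj =>
          (kernel.getD ki []).getD kj 0 == 1 && (((padded.getD (i+ki) []).getD (j+kj) 0) == 1))
        (List.range k_cols)) 0 1 (List.range k_rows)
    else 0))

-- ===== PORT B =====
-- offsets (relative to the output pixel) of the kernel's 1-cells
def pvOnes (kernel : List (List Int)) (pad_r pad_c : Nat) : List (Int × Int) :=
  (List.range kernel.length).flatMap (fun ki =>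
    ((List.range (kernel.headD []).length).filter
        (fun kj => (kernel.getD ki []).getD kj 0 == 1)).map
      (fun kj => ((ki : Int) - (pad_r : Int), (kj : Int) - (pad_c : Int))))

-- Source B's inner stamp: write v at (ii-di, jj-dj) for every offset, if in bounds
def pvStampOnes (rows cols : Nat) (ones : List (Int × Int)) (ii jj : Nat) (v : Int)
    (g : List (List Int)) : List (List Int) :=
  ones.foldl (fun g d =>
    if 0 ≤ (ii:Int) - d.1 ∧ (ii:Int) - d.1 < (rows:Int) ∧
       0 ≤ (jj:Int) - d.2 ∧ (jj:Int) - d.2 < (cols:Int) then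
      g.modify ((ii:Int) - d.1).toNat (fun rw => rw.set ((jj:Int) - d.2).toNat v)
    else g) g

-- Source B's scatter double loop: every pixel with keep(image[ii][jj]) stamps v
def pvScatter (image : List (List Int)) (rows cols : Nat) (ones : List (Int × Int))
    (keep : Int → Bool) (v : Int) (g : List (List Int)) : List (List Int) :=
  (List.range rows).foldl (fun g ii =>
    (List.range cols).foldl (fun g jj =>
      if keep ((image.getD ii []).getD jj 0) then pvStampOnes rows cols ones ii jj v g
      else g) g) g

def morphological_op_alt (image : List (List Int)) (kernel : List (List Int)) (operation : String) : List (List Int) :=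
  let rows := image.length
  let cols := (image.headD []).length
  let pad_r := kernel.length / 2
  let pad_c := (kernel.headD []).length / 2
  let ones := pvOnes kernel pad_r pad_c
  if operation == "dilate" then
    pvScatter image rows cols ones (fun x => x == 1) 1
      ((List.range rows).map (fun _ => List.replicate cols (0:Int)))
  else if operation == "erode" then
    if ones = [] then (List.range rows).map (fun _ => List.replicate cols (1:Int))
    else
      let min_r := ((ones.map Prod.fst).min?).getD 0
      let max_r := ((ones.map Prod.fst).max?).getD 0
      let min_c := ((ones.map Prod.snd).min?).getD 0
      let max_c := ((ones.map Prod.snd).max?).getD 0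
      pvScatter image rows cols ones (fun x => !(x == 1)) 0
        ((List.range rows).map (fun (i : Nat) => (List.range cols).map (fun (j : Nat) =>
          if 0 ≤ (i:Int) + min_r ∧ (i:Int) + max_r < (rows:Int) ∧
             0 ≤ (j:Int) + min_c ∧ (j:Int) + max_c < (cols:Int) then (1:Int) else 0)))
  else (List.range rows).map (fun _ => List.replicate cols (0:Int))

-- ===== PRECONDITION & SPEC =====
-- Pre_ excludes the empty image/kernel (A raises IndexError on len(image[0]) / len(kernel[0]))
-- and ragged inputs with a row shorter than the first row, on which A's indexing raises
-- IndexError (except when an early break or an unknown operation happens to skip the short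
-- row — an accident of break timing on malformed input, excluded with the rest of the
-- ragged inputs).
def Pre_morphological_op (image : List (List Int)) (kernel : List (List Int)) (operation : String) : Prop :=
  image ≠ [] ∧ kernel ≠ [] ∧
  (∀ r ∈ image, (image.headD []).length ≤ r.length) ∧
  (∀ r ∈ kernel, (kernel.headD []).length ≤ r.length)
instance (image : List (List Int)) (kernel : List (List Int)) (operation : String) : Decidable (Pre_morphological_op image kernel operation) := by unfold Pre_morphological_op; infer_instance

def pvWitness_morphological_op : List (List Int) × List (List Int) × String :=
  ([[1, 0], [1, 1]], [[1, 1]], "erode")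

def Spec_morphological_op (image : List (List Int)) (kernel : List (List Int)) (operation : String) (out : List (List Int)) : Prop := out = morphological_op_alt image kernel operation
instance (image : List (List Int)) (kernel : List (List Int)) (operation : String) (out : List (List Int)) : Decidable (Spec_morphological_op image kernel operation out) := by unfold Spec_morphological_op; infer_instance

-- ===== CLAIM (what is proved, stated in full; the proofs are below) =====
def Claim_equal_morphological_op : Prop := ∀ (image : List (List Int)) (kernel : List (List Int)) (operation : String), Dom_morphological_op image kernel operation → Pre_morphological_op image kernel operation → Spec_morphological_op image kernel operation (morphological_op image kernel operation)

-- ===== LEMMAS AND PROOFS =====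

-- ---------- A-side characterisation (gather form) ----------

-- A's inner break-loop is List.any
theorem pvInnerA_eq_any (pred : Nat → Bool) (l : List Nat) : pvInnerA pred l = l.any pred := by
  induction l with
  | nil => rfl
  | cons k rest ih => by_cases h : pred k <;> simp [pvInnerA, h, ih]

-- A's outer break-loop flips exactly when some iteration fires
theorem pvOuterA_eq (inner : Nat → Bool) (init flip : Int) (l : List Nat) :
    pvOuterA inner init flip l = if l.any inner then flip else init := by
  induction l with
  | nil => rfl
  | cons k rest ih => by_cases h : inner k <;> simp [pvOuterA, h, ih]

theorem len_foldl_set (pc : Nat) (v : Nat → Int) (l : List Nat) (row : List Int) :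
    (l.foldl (fun r j => r.set (j + pc) (v j)) row).length = row.length := by
  induction l generalizing row with
  | nil => rfl
  | cons k rest ih => simp [List.foldl_cons, ih, List.length_set]

-- the inner copy loop of pvPadded, characterised cell by cell
theorem foldl_set_getElem? (pc : Nat) (v : Nat → Int) (n : Nat) (row : List Int) (c : Nat) :
    ((List.range n).foldl (fun r j => r.set (j + pc) (v j)) row)[c]?
      = if pc ≤ c ∧ c < n + pc ∧ c < row.length then some (v (c - pc)) else row[c]? := by
  induction n with
  | zero => rw [if_neg (by omega)]; rfl
  | succ n ih =>
    rw [List.range_succ, List.foldl_append, List.foldl_cons, List.foldl_nil,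
      List.getElem?_set, len_foldl_set]
    by_cases h : n + pc = c
    · subst h
      by_cases hl : n + pc < row.length
      · rw [if_pos rfl, if_pos hl, if_pos (by omega), Nat.add_sub_cancel]
      · rw [if_pos rfl, if_neg hl, if_neg (by omega), List.getElem?_eq_none (by omega)]
    · rw [if_neg h, ih]
      split_ifs with h1 h2 <;> try rfl
      all_goals (exfalso; omega)

theorem foldl_set_getD (pc : Nat) (v : Nat → Int) (n : Nat) (row : List Int) (c : Nat) :
    ((List.range n).foldl (fun r j => r.set (j + pc) (v j)) row).getD c 0
      = if pc ≤ c ∧ c < n + pc ∧ c < row.length then v (c - pc) else row.getD c 0 := by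
  rw [List.getD_eq_getElem?_getD, foldl_set_getElem?]
  split_ifs <;> simp [List.getD_eq_getElem?_getD]

-- the outer copy loop of pvPadded, characterised row by row
theorem foldl_modify_getElem? (pr : Nat) (F : Nat → List Int → List Int) (n : Nat)
    (p : List (List Int)) (r : Nat) :
    ((List.range n).foldl (fun q i => q.modify (i + pr) (F i)) p)[r]?
      = if pr ≤ r ∧ r < n + pr then (p[r]?).map (F (r - pr)) else p[r]? := by
  induction n with
  | zero => rw [if_neg (by omega)]; rfl
  | succ n ih =>
    rw [List.range_succ, List.foldl_append, List.foldl_cons, List.foldl_nil,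
      List.getElem?_modify, ih]
    by_cases h : n + pr = r
    · subst h
      rw [if_neg (by omega), if_pos (by omega), Nat.add_sub_cancel]
      cases p[n + pr]? <;> simp
    · split_ifs with h1 h2 <;> (cases p[r]? <;> simp_all) <;> omega

theorem foldl_modify_getD (pr : Nat) (F : Nat → List Int → List Int) (n : Nat)
    (p : List (List Int)) (r : Nat) :
    ((List.range n).foldl (fun q i => q.modify (i + pr) (F i)) p).getD r []
      = if pr ≤ r ∧ r < n + pr then
          (if r < p.length then F (r - pr) (p.getD r []) else []) else p.getD r [] := by
  rw [List.getD_eq_getElem?_getD, foldl_modify_getElem?]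
  split_ifs with h1 h2
  · rw [List.getElem?_eq_getElem (by omega)]
    simp [List.getD_eq_getElem?_getD, List.getElem?_eq_getElem (show r < p.length by omega)]
  · rw [List.getElem?_eq_none (by omega)]; rfl
  · rw [List.getD_eq_getElem?_getD]

-- a foldl of modifies at one fixed index is one modify by the folded row update
theorem foldl_modify_fixed (a : Nat) (s : Nat → List Int → List Int) (l : List Nat)
    (q : List (List Int)) :
    l.foldl (fun q j => q.modify a (s j)) q
      = q.modify a (fun rw => l.foldl (fun rw j => s j rw) rw) := by
  induction l generalizing q with
  | nil => exact (List.modify_id a q).symm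
  | cons k rest ih =>
    rw [List.foldl_cons, ih, List.modify_modify_eq]
    rfl

theorem inner_as_modify (image : List (List Int)) (pad_r pad_c cols i : Nat)
    (q : List (List Int)) :
    (List.range cols).foldl (fun q j =>
        q.modify (i + pad_r) (fun rw => rw.set (j + pad_c) ((image.getD i []).getD j 0))) q
      = q.modify (i + pad_r) (fun rw =>
          (List.range cols).foldl (fun rw j => rw.set (j + pad_c) ((image.getD i []).getD j 0)) rw) := by
  exact foldl_modify_fixed (i + pad_r)
    (fun j rw => rw.set (j + pad_c) ((image.getD i []).getD j 0)) (List.range cols) q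

-- the padded buffer reads as the zero-extended image shifted by (pad_r, pad_c)
theorem pvPadded_getD (image : List (List Int)) (rows cols pad_r pad_c : Nat) (r c : Nat) :
    ((pvPadded image rows cols pad_r pad_c).getD r []).getD c 0
      = if pad_r ≤ r ∧ r < rows + pad_r ∧ pad_c ≤ c ∧ c < cols + pad_c then
          (image.getD (r - pad_r) []).getD (c - pad_c) 0
        else 0 := by
  unfold pvPadded
  rw [PySem.List.foldl_congr_mem (List.range rows) _
      (fun p i => p.modify (i + pad_r)
        (fun rw => (List.range cols).foldl
          (fun rw j => rw.set (j + pad_c) ((image.getD i []).getD j 0)) rw)) _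
      (fun q i _ => inner_as_modify image pad_r pad_c cols i q)]
  rw [foldl_modify_getD]
  have hlen : (List.replicate (rows + 2*pad_r) (List.replicate (cols + 2*pad_c) (0:Int))).length
      = rows + 2*pad_r := List.length_replicate
  by_cases hr : pad_r ≤ r ∧ r < rows + pad_r
  · rw [if_pos hr, if_pos (by omega),
      show (List.replicate (rows + 2*pad_r) (List.replicate (cols + 2*pad_c) (0:Int))).getD r []
        = List.replicate (cols + 2*pad_c) (0:Int) from by
          rw [List.getD_eq_getElem?_getD, List.getElem?_replicate, if_pos (by omega)]; rfl,
      foldl_set_getD, List.length_replicate]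
    by_cases hc : pad_c ≤ c ∧ c < cols + pad_c
    · rw [if_pos (by omega), if_pos (by omega)]
    · rw [if_neg (by omega), if_neg (by omega)]
      simp [List.getD_eq_getElem?_getD, List.getElem?_replicate]
      split_ifs <;> simp
  · rw [if_neg (by omega), if_neg (by omega)]
    simp only [List.getD_eq_getElem?_getD, List.getElem?_replicate]
    split_ifs <;> simp [List.getElem?_replicate] <;> split_ifs <;> simp

-- bounds-checked direct read of the image (proof vocabulary; 0 outside)
def pvPx (image : List (List Int)) (rows cols : Nat) (ii jj : Int) : Int :=
  if 0 ≤ ii ∧ ii < (rows : Int) ∧ 0 ≤ jj ∧ jj < (cols : Int) then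
    (image.getD ii.toNat []).getD jj.toNat 0
  else 0

-- a bounds-checked direct read equals A's padded read
theorem px_eq_padded (image : List (List Int)) (rows cols pad_r pad_c a b : Nat) :
    pvPx image rows cols ((a : Int) - (pad_r : Int)) ((b : Int) - (pad_c : Int))
      = ((pvPadded image rows cols pad_r pad_c).getD a []).getD b 0 := by
  rw [pvPadded_getD]
  unfold pvPx
  split_ifs with h1 h2 <;> try (exfalso; omega)
  · congr 1
    · congr 1; omega
    · omega
  · rfl

theorem mem_pvOnes (kernel : List (List Int)) (pad_r pad_c : Nat) (d : Int × Int) :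
    d ∈ pvOnes kernel pad_r pad_c ↔
      ∃ ki, ki < kernel.length ∧ ∃ kj, kj < (kernel.headD []).length ∧
        (kernel.getD ki []).getD kj 0 = 1 ∧
        d = ((ki : Int) - (pad_r : Int), (kj : Int) - (pad_c : Int)) := by
  simp only [pvOnes, List.mem_flatMap, List.mem_map, List.mem_range]
  aesop

theorem cast_shift (i k p : Nat) : (i:Int) + ((k:Int) - (p:Int)) = ((i + k : Nat) : Int) - (p:Int) := by
  push_cast; ring

-- erode: A's "some covered pixel ≠ 1" is the negation of "every covered pixel = 1"
theorem erode_bool (image kernel : List (List Int)) (rows cols pad_r pad_c i j : Nat) :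
    ((List.range kernel.length).any (fun ki =>
        (List.range (kernel.headD []).length).any (fun kj =>
          (kernel.getD ki []).getD kj 0 == 1 &&
            !((((pvPadded image rows cols pad_r pad_c).getD (i+ki) []).getD (j+kj) 0) == 1))))
      = !((pvOnes kernel pad_r pad_c).all (fun d =>
            pvPx image rows cols ((i:Int) + d.1) ((j:Int) + d.2) == 1)) := by
  rw [Bool.eq_iff_iff, Bool.not_eq_true', List.all_eq_false]
  simp only [List.any_eq_true, List.mem_range, Bool.and_eq_true, beq_iff_eq,
    Bool.not_eq_true', beq_eq_false_iff_ne, ne_eq]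
  constructor
  · rintro ⟨ki, hki, kj, hkj, hv, hp⟩
    refine ⟨((ki:Int) - pad_r, (kj:Int) - pad_c),
      (mem_pvOnes _ _ _ _).2 ⟨ki, hki, kj, hkj, hv, rfl⟩, ?_⟩
    rw [cast_shift, cast_shift, px_eq_padded]
    simpa using hp
  · rintro ⟨d, hd, hne⟩
    obtain ⟨ki, hki, kj, hkj, hv, rfl⟩ := (mem_pvOnes _ _ _ _).1 hd
    refine ⟨ki, hki, kj, hkj, hv, ?_⟩
    rw [cast_shift, cast_shift, px_eq_padded] at hne
    simpa using hne

-- dilate: A's "some covered pixel = 1"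
theorem dilate_bool (image kernel : List (List Int)) (rows cols pad_r pad_c i j : Nat) :
    ((List.range kernel.length).any (fun ki =>
        (List.range (kernel.headD []).length).any (fun kj =>
          (kernel.getD ki []).getD kj 0 == 1 &&
            ((((pvPadded image rows cols pad_r pad_c).getD (i+ki) []).getD (j+kj) 0) == 1))))
      = (pvOnes kernel pad_r pad_c).any (fun d =>
            pvPx image rows cols ((i:Int) + d.1) ((j:Int) + d.2) == 1) := by
  rw [Bool.eq_iff_iff]
  simp only [List.any_eq_true, List.mem_range, Bool.and_eq_true, beq_iff_eq]
  constructor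
  · rintro ⟨ki, hki, kj, hkj, hv, hp⟩
    refine ⟨((ki:Int) - pad_r, (kj:Int) - pad_c),
      (mem_pvOnes _ _ _ _).2 ⟨ki, hki, kj, hkj, hv, rfl⟩, ?_⟩
    rw [cast_shift, cast_shift, px_eq_padded]
    simpa using hp
  · rintro ⟨d, hd, hp⟩
    obtain ⟨ki, hki, kj, hkj, hv, rfl⟩ := (mem_pvOnes _ _ _ _).1 hd
    refine ⟨ki, hki, kj, hkj, hv, ?_⟩
    rw [cast_shift, cast_shift, px_eq_padded] at hp
    simpa using hp

-- ---------- B-side: the scatter loops, cell by cell ----------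

-- a grid of exactly rows × cols
def pvShape (rows cols : Nat) (g : List (List Int)) : Prop :=
  g.length = rows ∧ ∀ rr, rr < rows → (g.getD rr []).length = cols

-- reading a modified row
theorem getD_modify (g : List (List Int)) (a : Nat) (f : List Int → List Int) (r : Nat)
    (hf : f [] = []) :
    (g.modify a f).getD r [] = if a = r then f (g.getD r []) else g.getD r [] := by
  rw [List.getD_eq_getElem?_getD, List.getElem?_modify]
  by_cases har : a = r
  · subst har
    cases hx : g[a]? with
    | none => simp [List.getD_eq_getElem?_getD, hx, hf]
    | some row => simp [List.getD_eq_getElem?_getD, hx]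
  · simp [har, List.getD_eq_getElem?_getD]

-- reading a set cell
theorem getD_set (row : List Int) (b : Nat) (v : Int) (c : Nat) :
    (row.set b v).getD c 0 = if b = c ∧ c < row.length then v else row.getD c 0 := by
  rw [List.getD_eq_getElem?_getD, List.getElem?_set]
  by_cases hbc : b = c
  · subst hbc
    by_cases hl : b < row.length
    · simp [hl]
    · simp [hl, List.getD_eq_getElem?_getD]
  · simp [hbc, List.getD_eq_getElem?_getD]

-- writing one in-bounds cell, read back
theorem cell_modify_set (rows cols : Nat) (g : List (List Int)) (a b : Nat) (v : Int)
    (hsh : pvShape rows cols g) (ha : a < rows) (hb : b < cols) (r c : Nat) :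
    (((g.modify a (fun rw => rw.set b v)).getD r []).getD c 0)
      = if a = r ∧ b = c then v else (g.getD r []).getD c 0 := by
  rw [getD_modify g a _ r (by simp)]
  by_cases har : a = r
  · subst har
    rw [if_pos rfl, getD_set]
    have hrl : (g.getD a []).length = cols := hsh.2 a ha
    by_cases hbc : b = c
    · rw [if_pos ⟨hbc, by omega⟩, if_pos ⟨rfl, hbc⟩]
    · rw [if_neg (by tauto), if_neg (by tauto)]
  · rw [if_neg har, if_neg (by tauto)]

theorem shape_modify_set (rows cols : Nat) (g : List (List Int)) (a b : Nat) (v : Int)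
    (hsh : pvShape rows cols g) :
    pvShape rows cols (g.modify a (fun rw => rw.set b v)) := by
  refine ⟨by rw [List.length_modify]; exact hsh.1, fun rr hrr => ?_⟩
  rw [getD_modify g a _ rr (by simp)]
  by_cases har : a = rr
  · rw [if_pos har, List.length_set]; exact hsh.2 rr hrr
  · rw [if_neg har]; exact hsh.2 rr hrr

-- a fold of same-value stamps, cell by cell: v if some step hits (r,c), else unchanged
theorem foldl_stamp_cell {α : Type} (rows cols : Nat) (v : Int) (r c : Nat)
    (f : List (List Int) → α → List (List Int)) (P : α → Bool)
    (hshape : ∀ g a, pvShape rows cols g → pvShape rows cols (f g a))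
    (hcell : ∀ g a, pvShape rows cols g →
      (((f g a).getD r []).getD c 0) = if P a then v else (g.getD r []).getD c 0)
    (L : List α) (g : List (List Int)) (hg : pvShape rows cols g) :
    (((L.foldl f g).getD r []).getD c 0)
      = if L.any P then v else (g.getD r []).getD c 0 := by
  induction L generalizing g with
  | nil => simp
  | cons a L ih =>
    rw [List.foldl_cons, ih (f g a) (hshape g a hg), hcell g a hg, List.any_cons]
    by_cases hp : P a = true
    · by_cases hl : L.any P = true <;> simp [hp, hl]
    · by_cases hl : L.any P = true <;> simp [hp, hl]

theorem foldl_stamp_shape {α : Type} (rows cols : Nat)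
    (f : List (List Int) → α → List (List Int))
    (hshape : ∀ g a, pvShape rows cols g → pvShape rows cols (f g a))
    (L : List α) (g : List (List Int)) (hg : pvShape rows cols g) :
    pvShape rows cols (L.foldl f g) := by
  induction L generalizing g with
  | nil => exact hg
  | cons a L ih => exact ih (f g a) (hshape g a hg)

-- whether offset d of the stamp at source pixel (ii,jj) lands on cell (r,c)
def pvHit (rows cols ii jj r c : Nat) (d : Int × Int) : Bool :=
  ((ii:Int) - d.1 == (r:Int)) && ((jj:Int) - d.2 == (c:Int)) &&
    decide (r < rows) && decide (c < cols)

theorem shape_stampOnes (rows cols : Nat) (ones : List (Int × Int)) (ii jj : Nat) (v : Int)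
    (g : List (List Int)) (hg : pvShape rows cols g) :
    pvShape rows cols (pvStampOnes rows cols ones ii jj v g) := by
  unfold pvStampOnes
  refine foldl_stamp_shape rows cols _ (fun g d hsh => ?_) ones g hg
  split_ifs with h
  · exact shape_modify_set rows cols g _ _ v hsh
  · exact hsh

theorem stampOnes_cell (rows cols : Nat) (ones : List (Int × Int)) (ii jj : Nat) (v : Int)
    (g : List (List Int)) (hg : pvShape rows cols g) (r c : Nat) :
    ((pvStampOnes rows cols ones ii jj v g).getD r []).getD c 0
      = if ones.any (pvHit rows cols ii jj r c) then v else (g.getD r []).getD c 0 := by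
  unfold pvStampOnes
  refine foldl_stamp_cell rows cols v r c _ (pvHit rows cols ii jj r c)
    (fun g d hsh => by split_ifs with h; exacts [shape_modify_set rows cols g _ _ v hsh, hsh])
    (fun g d hsh => ?_) ones g hg
  by_cases h : 0 ≤ (ii:Int) - d.1 ∧ (ii:Int) - d.1 < (rows:Int) ∧
      0 ≤ (jj:Int) - d.2 ∧ (jj:Int) - d.2 < (cols:Int)
  · rw [if_pos h,
      cell_modify_set rows cols g ((ii:Int) - d.1).toNat ((jj:Int) - d.2).toNat v hsh
        (by omega) (by omega) r c]
    unfold pvHit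
    by_cases he : ((ii:Int) - d.1).toNat = r ∧ ((jj:Int) - d.2).toNat = c
    · rw [if_pos he]
      have h1 : (ii:Int) - d.1 = (r:Int) := by omega
      have h2 : (jj:Int) - d.2 = (c:Int) := by omega
      have hr : r < rows := by omega
      have hc : c < cols := by omega
      simp [h1, h2, hr, hc]
    · rw [if_neg he]
      have : ¬ (((ii:Int) - d.1 = (r:Int)) ∧ ((jj:Int) - d.2 = (c:Int))) := by omega
      by_cases h1 : (ii:Int) - d.1 = (r:Int) <;> by_cases h2 : (jj:Int) - d.2 = (c:Int) <;>
        simp [h1, h2] <;> omega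
  · rw [if_neg h]
    unfold pvHit
    have : ¬ (((ii:Int) - d.1 = (r:Int)) ∧ ((jj:Int) - d.2 = (c:Int)) ∧ r < rows ∧ c < cols) := by
      omega
    by_cases h1 : (ii:Int) - d.1 = (r:Int) <;> by_cases h2 : (jj:Int) - d.2 = (c:Int) <;>
      by_cases h3 : r < rows <;> by_cases h4 : c < cols <;> simp [h1, h2, h3, h4] <;> omega

theorem shape_scatter (image : List (List Int)) (rows cols : Nat) (ones : List (Int × Int))
    (keep : Int → Bool) (v : Int) (g : List (List Int)) (hg : pvShape rows cols g) :
    pvShape rows cols (pvScatter image rows cols ones keep v g) := by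
  unfold pvScatter
  refine foldl_stamp_shape rows cols _ (fun g ii hsh => ?_) (List.range rows) g hg
  refine foldl_stamp_shape rows cols _ (fun g jj hsh => ?_) (List.range cols) g hsh
  split_ifs with h
  · exact shape_stampOnes rows cols ones ii jj v g hsh
  · exact hsh

-- the whole scatter, cell by cell
theorem scatter_cell (image : List (List Int)) (rows cols : Nat) (ones : List (Int × Int))
    (keep : Int → Bool) (v : Int) (g : List (List Int)) (hg : pvShape rows cols g) (r c : Nat) :
    ((pvScatter image rows cols ones keep v g).getD r []).getD c 0
      = if (List.range rows).any (fun ii => (List.range cols).any (fun jj =>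
            keep ((image.getD ii []).getD jj 0) && ones.any (pvHit rows cols ii jj r c)))
        then v else (g.getD r []).getD c 0 := by
  unfold pvScatter
  refine foldl_stamp_cell rows cols v r c _ _
    (fun g ii hsh => foldl_stamp_shape rows cols _
      (fun g jj hsh => by
        split_ifs with h
        exacts [shape_stampOnes rows cols ones ii jj v g hsh, hsh]) (List.range cols) g hsh)
    (fun g ii hsh => ?_) (List.range rows) g hg
  refine foldl_stamp_cell rows cols v r c _ _
    (fun g jj hsh => by
      split_ifs with h
      exacts [shape_stampOnes rows cols ones ii jj v g hsh, hsh])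
    (fun g jj hsh => ?_) (List.range cols) g hsh
  by_cases h : keep ((image.getD ii []).getD jj 0) = true
  · rw [if_pos h, stampOnes_cell rows cols ones ii jj v g hsh r c, h, Bool.true_and]
  · have hk : keep ((image.getD ii []).getD jj 0) = false := by
      revert h; cases keep ((image.getD ii []).getD jj 0) <;> simp
    rw [if_neg h, hk, Bool.false_and]
    simp

-- the scatter hit condition, in gather form: some kernel offset covers (r,c) from a kept pixel
theorem scatter_cond (image : List (List Int)) (rows cols : Nat) (ones : List (Int × Int))
    (keep : Int → Bool) (r c : Nat) (hr : r < rows) (hc : c < cols) :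
    ((List.range rows).any (fun ii => (List.range cols).any (fun jj =>
        keep ((image.getD ii []).getD jj 0) && ones.any (pvHit rows cols ii jj r c))) = true)
      ↔ ∃ d ∈ ones, 0 ≤ (r:Int) + d.1 ∧ (r:Int) + d.1 < (rows:Int) ∧
          0 ≤ (c:Int) + d.2 ∧ (c:Int) + d.2 < (cols:Int) ∧
          keep ((image.getD ((r:Int) + d.1).toNat []).getD ((c:Int) + d.2).toNat 0) = true := by
  simp only [List.any_eq_true, List.mem_range, Bool.and_eq_true, pvHit, decide_eq_true_eq,
    beq_iff_eq]
  constructor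
  · rintro ⟨ii, hii, jj, hjj, hkeep, d, hd, ⟨⟨h1, h2⟩, _⟩, _⟩
    refine ⟨d, hd, by omega, by omega, by omega, by omega, ?_⟩
    have e1 : ((r:Int) + d.1).toNat = ii := by omega
    have e2 : ((c:Int) + d.2).toNat = jj := by omega
    rw [e1, e2]; exact hkeep
  · rintro ⟨d, hd, h1, h2, h3, h4, hkeep⟩
    refine ⟨((r:Int) + d.1).toNat, by omega, ((c:Int) + d.2).toNat, by omega, hkeep,
      d, hd, ⟨⟨by omega, by omega⟩, hr⟩, hc⟩

-- ---------- grid extensionality and the initial grids ----------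

theorem pvGrid_ext (rows cols : Nat) (g1 g2 : List (List Int))
    (h1 : pvShape rows cols g1) (h2 : pvShape rows cols g2)
    (h : ∀ r, r < rows → ∀ c, c < cols → (g1.getD r []).getD c 0 = (g2.getD r []).getD c 0) :
    g1 = g2 := by
  apply List.ext_getElem (by rw [h1.1, h2.1])
  intro r hr1 hr2
  have hr : r < rows := h1.1 ▸ hr1
  have e1 : g1[r] = g1.getD r [] := by
    rw [List.getD_eq_getElem?_getD, List.getElem?_eq_getElem hr1]; rfl
  have e2 : g2[r] = g2.getD r [] := by
    rw [List.getD_eq_getElem?_getD, List.getElem?_eq_getElem hr2]; rfl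
  rw [e1, e2]
  apply List.ext_getElem (by rw [h1.2 r hr, h2.2 r hr])
  intro c hc1 hc2
  have hc : c < cols := (h1.2 r hr) ▸ hc1
  have f1 : (g1.getD r []).getD c 0 = (g1.getD r [])[c] := by
    rw [List.getD_eq_getElem?_getD (l := g1.getD r []), List.getElem?_eq_getElem hc1]; rfl
  have f2 : (g2.getD r []).getD c 0 = (g2.getD r [])[c] := by
    rw [List.getD_eq_getElem?_getD (l := g2.getD r []), List.getElem?_eq_getElem hc2]; rfl
  exact f1.symm.trans ((h r hr c hc).trans f2)

theorem shape_mapgrid (rows cols : Nat) (f : Nat → List Int)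
    (hf : ∀ i, i < rows → (f i).length = cols) :
    pvShape rows cols ((List.range rows).map f) := by
  refine ⟨by simp, fun rr hrr => ?_⟩
  rw [List.getD_eq_getElem?_getD, List.getElem?_map, List.getElem?_range hrr]
  simp [hf rr hrr]

theorem cell_mapgrid (rows cols : Nat) (f : Nat → List Int) (r c : Nat) (hr : r < rows) :
    (((List.range rows).map f).getD r []).getD c 0 = (f r).getD c 0 := by
  rw [List.getD_eq_getElem?_getD (l := (List.range rows).map f), List.getElem?_map,
    List.getElem?_range hr]
  rfl

theorem cell_maprow (cols : Nat) (h : Nat → Int) (c : Nat) (hc : c < cols) :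
    ((List.range cols).map h).getD c 0 = h c := by
  rw [List.getD_eq_getElem?_getD, List.getElem?_map, List.getElem?_range hc]
  rfl

theorem cell_replrow (cols : Nat) (v : Int) (c : Nat) (hc : c < cols) :
    (List.replicate cols v).getD c 0 = v := by
  rw [List.getD_eq_getElem?_getD, List.getElem?_replicate, if_pos hc]
  rfl

-- ---------- the border band for erosion ----------

theorem border_iff (ones : List (Int × Int)) (hne : ones ≠ []) (rows cols i j : Nat) :
    (0 ≤ (i:Int) + ((ones.map Prod.fst).min?).getD 0 ∧
     (i:Int) + ((ones.map Prod.fst).max?).getD 0 < (rows:Int) ∧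
     0 ≤ (j:Int) + ((ones.map Prod.snd).min?).getD 0 ∧
     (j:Int) + ((ones.map Prod.snd).max?).getD 0 < (cols:Int))
      ↔ ∀ d ∈ ones, 0 ≤ (i:Int) + d.1 ∧ (i:Int) + d.1 < (rows:Int) ∧
          0 ≤ (j:Int) + d.2 ∧ (j:Int) + d.2 < (cols:Int) := by
  have hne1 : ones.map Prod.fst ≠ [] := by simp [hne]
  have hne2 : ones.map Prod.snd ≠ [] := by simp [hne]
  obtain ⟨mr, hmr⟩ : ∃ a, (ones.map Prod.fst).min? = some a := by
    cases h : (ones.map Prod.fst).min? with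
    | none => exact absurd (List.min?_eq_none_iff.1 h) hne1
    | some a => exact ⟨a, rfl⟩
  obtain ⟨Mr, hMr⟩ : ∃ a, (ones.map Prod.fst).max? = some a := by
    cases h : (ones.map Prod.fst).max? with
    | none => exact absurd (List.max?_eq_none_iff.1 h) hne1
    | some a => exact ⟨a, rfl⟩
  obtain ⟨mc, hmc⟩ : ∃ a, (ones.map Prod.snd).min? = some a := by
    cases h : (ones.map Prod.snd).min? with
    | none => exact absurd (List.min?_eq_none_iff.1 h) hne2
    | some a => exact ⟨a, rfl⟩
  obtain ⟨Mc, hMc⟩ : ∃ a, (ones.map Prod.snd).max? = some a := by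
    cases h : (ones.map Prod.snd).max? with
    | none => exact absurd (List.max?_eq_none_iff.1 h) hne2
    | some a => exact ⟨a, rfl⟩
  obtain ⟨hmr_mem, hmr_le⟩ := List.min?_eq_some_iff.1 hmr
  obtain ⟨hMr_mem, hMr_ge⟩ := List.max?_eq_some_iff.1 hMr
  obtain ⟨hmc_mem, hmc_le⟩ := List.min?_eq_some_iff.1 hmc
  obtain ⟨hMc_mem, hMc_ge⟩ := List.max?_eq_some_iff.1 hMc
  rw [hmr, hMr, hmc, hMc]
  simp only [Option.getD_some]
  constructor
  · rintro ⟨b1, b2, b3, b4⟩ d hd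
    have h1 := hmr_le d.1 (List.mem_map.2 ⟨d, hd, rfl⟩)
    have h2 := hMr_ge d.1 (List.mem_map.2 ⟨d, hd, rfl⟩)
    have h3 := hmc_le d.2 (List.mem_map.2 ⟨d, hd, rfl⟩)
    have h4 := hMc_ge d.2 (List.mem_map.2 ⟨d, hd, rfl⟩)
    exact ⟨by omega, by omega, by omega, by omega⟩
  · intro h
    obtain ⟨d1, hd1, hd1e⟩ := List.mem_map.1 hmr_mem
    obtain ⟨d2, hd2, hd2e⟩ := List.mem_map.1 hMr_mem
    obtain ⟨d3, hd3, hd3e⟩ := List.mem_map.1 hmc_mem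
    obtain ⟨d4, hd4, hd4e⟩ := List.mem_map.1 hMc_mem
    have h1 := h d1 hd1
    have h2 := h d2 hd2
    have h3 := h d3 hd3
    have h4 := h d4 hd4
    omega

-- in-bounds pvPx is the direct read
theorem pvPx_inb (image : List (List Int)) (rows cols : Nat) (ii jj : Int)
    (h : 0 ≤ ii ∧ ii < (rows:Int) ∧ 0 ≤ jj ∧ jj < (cols:Int)) :
    pvPx image rows cols ii jj = (image.getD ii.toNat []).getD jj.toNat 0 := by
  unfold pvPx
  rw [if_pos h]

-- ---------- the per-operation equalities ----------

-- dilate: scatter of 1s from the 1-pixels equals A's gather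
theorem dilate_cell (image : List (List Int)) (rows cols : Nat) (ones : List (Int × Int))
    (i j : Nat) (hi : i < rows) (hj : j < cols) :
    ((pvScatter image rows cols ones (fun x => x == 1) 1
        ((List.range rows).map (fun _ => List.replicate cols (0:Int)))).getD i []).getD j 0
      = if ones.any (fun d => pvPx image rows cols ((i:Int) + d.1) ((j:Int) + d.2) == 1)
        then 1 else 0 := by
  have hg : pvShape rows cols ((List.range rows).map (fun _ => List.replicate cols (0:Int))) :=
    shape_mapgrid rows cols _ (fun _ _ => List.length_replicate)
  rw [scatter_cell image rows cols ones (fun x => x == 1) 1 _ hg i j]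
  have hcond : ((List.range rows).any (fun ii => (List.range cols).any (fun jj =>
        ((image.getD ii []).getD jj 0 == 1) && ones.any (pvHit rows cols ii jj i j))) = true)
      ↔ (ones.any (fun d => pvPx image rows cols ((i:Int) + d.1) ((j:Int) + d.2) == 1) = true) := by
    rw [scatter_cond image rows cols ones (fun x => x == 1) i j hi hj]
    simp only [List.any_eq_true, beq_iff_eq]
    constructor
    · rintro ⟨d, hd, h1, h2, h3, h4, hv⟩
      exact ⟨d, hd, by rw [pvPx_inb image rows cols _ _ ⟨h1, h2, h3, h4⟩]; exact hv⟩
    · rintro ⟨d, hd, hv⟩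
      by_cases hb : 0 ≤ (i:Int) + d.1 ∧ (i:Int) + d.1 < (rows:Int) ∧
          0 ≤ (j:Int) + d.2 ∧ (j:Int) + d.2 < (cols:Int)
      · exact ⟨d, hd, hb.1, hb.2.1, hb.2.2.1, hb.2.2.2,
          by rw [pvPx_inb image rows cols _ _ hb] at hv; exact hv⟩
      · exfalso
        unfold pvPx at hv
        rw [if_neg hb] at hv
        exact absurd hv (by norm_num)
  by_cases h : (List.range rows).any (fun ii => (List.range cols).any (fun jj =>
      ((image.getD ii []).getD jj 0 == 1) && ones.any (pvHit rows cols ii jj i j))) = true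
  · rw [if_pos h, if_pos (by
      have := hcond.1 h
      simpa using this)]
  · rw [if_neg h, if_neg (by
      intro hc
      exact h (hcond.2 (by simpa using hc)))]
    rw [cell_mapgrid rows cols _ i j hi, cell_replrow cols 0 j hj]

-- erode: border-band init plus scatter of 0s from the non-1 pixels equals A's gather
theorem erode_cell (image : List (List Int)) (rows cols : Nat) (ones : List (Int × Int))
    (hne : ones ≠ []) (i j : Nat) (hi : i < rows) (hj : j < cols) :
    ((pvScatter image rows cols ones (fun x => !(x == 1)) 0
        ((List.range rows).map (fun (i : Nat) => (List.range cols).map (fun (j : Nat) =>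
          if 0 ≤ (i:Int) + ((ones.map Prod.fst).min?).getD 0 ∧
             (i:Int) + ((ones.map Prod.fst).max?).getD 0 < (rows:Int) ∧
             0 ≤ (j:Int) + ((ones.map Prod.snd).min?).getD 0 ∧
             (j:Int) + ((ones.map Prod.snd).max?).getD 0 < (cols:Int)
          then (1:Int) else 0)))).getD i []).getD j 0
      = if ones.all (fun d => pvPx image rows cols ((i:Int) + d.1) ((j:Int) + d.2) == 1)
        then 1 else 0 := by
  have hg : pvShape rows cols ((List.range rows).map (fun (i : Nat) => (List.range cols).map (fun (j : Nat) =>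
      if 0 ≤ (i:Int) + ((ones.map Prod.fst).min?).getD 0 ∧
         (i:Int) + ((ones.map Prod.fst).max?).getD 0 < (rows:Int) ∧
         0 ≤ (j:Int) + ((ones.map Prod.snd).min?).getD 0 ∧
         (j:Int) + ((ones.map Prod.snd).max?).getD 0 < (cols:Int)
      then (1:Int) else 0))) :=
    shape_mapgrid rows cols _ (fun _ _ => by simp)
  rw [scatter_cell image rows cols ones (fun x => !(x == 1)) 0 _ hg i j,
    cell_mapgrid rows cols _ i j hi, cell_maprow cols _ j hj]
  -- the scatter hit condition: some in-bounds covered pixel is ≠ 1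
  have hcond : ((List.range rows).any (fun ii => (List.range cols).any (fun jj =>
        (!((image.getD ii []).getD jj 0 == 1)) && ones.any (pvHit rows cols ii jj i j))) = true)
      ↔ ∃ d ∈ ones, 0 ≤ (i:Int) + d.1 ∧ (i:Int) + d.1 < (rows:Int) ∧
          0 ≤ (j:Int) + d.2 ∧ (j:Int) + d.2 < (cols:Int) ∧
          pvPx image rows cols ((i:Int) + d.1) ((j:Int) + d.2) ≠ 1 := by
    rw [scatter_cond image rows cols ones (fun x => !(x == 1)) i j hi hj]
    constructor
    · rintro ⟨d, hd, h1, h2, h3, h4, hv⟩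
      refine ⟨d, hd, h1, h2, h3, h4, ?_⟩
      rw [pvPx_inb image rows cols _ _ ⟨h1, h2, h3, h4⟩]
      simpa using hv
    · rintro ⟨d, hd, h1, h2, h3, h4, hv⟩
      refine ⟨d, hd, h1, h2, h3, h4, ?_⟩
      rw [pvPx_inb image rows cols _ _ ⟨h1, h2, h3, h4⟩] at hv
      simpa using hv
  -- "all covered pixels = 1" ↔ border ok ∧ no hit
  have hall : (ones.all (fun d => pvPx image rows cols ((i:Int) + d.1) ((j:Int) + d.2) == 1) = true)
      ↔ ((0 ≤ (i:Int) + ((ones.map Prod.fst).min?).getD 0 ∧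
          (i:Int) + ((ones.map Prod.fst).max?).getD 0 < (rows:Int) ∧
          0 ≤ (j:Int) + ((ones.map Prod.snd).min?).getD 0 ∧
          (j:Int) + ((ones.map Prod.snd).max?).getD 0 < (cols:Int)) ∧
        ¬ ∃ d ∈ ones, 0 ≤ (i:Int) + d.1 ∧ (i:Int) + d.1 < (rows:Int) ∧
            0 ≤ (j:Int) + d.2 ∧ (j:Int) + d.2 < (cols:Int) ∧
            pvPx image rows cols ((i:Int) + d.1) ((j:Int) + d.2) ≠ 1) := by
    rw [border_iff ones hne rows cols i j]
    simp only [List.all_eq_true, beq_iff_eq, not_exists]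
    constructor
    · intro h
      constructor
      · intro d hd
        have hv := h d hd
        by_contra hb
        unfold pvPx at hv
        rw [if_neg (by omega)] at hv
        norm_num at hv
      · rintro d ⟨hd, _, _, _, _, hne1⟩
        exact hne1 (h d hd)
    · rintro ⟨hb, hn⟩ d hd
      have hbd := hb d hd
      by_contra hv
      exact hn d ⟨hd, hbd.1, hbd.2.1, hbd.2.2.1, hbd.2.2.2, hv⟩
  by_cases hs : (List.range rows).any (fun ii => (List.range cols).any (fun jj =>
      (!((image.getD ii []).getD jj 0 == 1)) && ones.any (pvHit rows cols ii jj i j))) = true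
  · rw [if_pos hs, if_neg (by
      intro hA
      exact (hall.1 hA).2 (hcond.1 hs))]
  · rw [if_neg hs]
    by_cases hb : 0 ≤ (i:Int) + ((ones.map Prod.fst).min?).getD 0 ∧
        (i:Int) + ((ones.map Prod.fst).max?).getD 0 < (rows:Int) ∧
        0 ≤ (j:Int) + ((ones.map Prod.snd).min?).getD 0 ∧
        (j:Int) + ((ones.map Prod.snd).max?).getD 0 < (cols:Int)
    · rw [if_pos hb, if_pos (hall.2 ⟨hb, fun hc => hs (hcond.2 hc)⟩)]
    · rw [if_neg hb, if_neg (by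
        intro hA
        exact hb (hall.1 hA).1)]

-- ---------- ports agree ----------

theorem ports_agree (image kernel : List (List Int)) (operation : String) :
    morphological_op image kernel operation = morphological_op_alt image kernel operation := by
  simp only [morphological_op, morphological_op_alt]
  by_cases h1 : (operation == "erode") = true
  · have hne : ¬ ((operation == "dilate") = true) := by
      simp only [beq_iff_eq] at h1 ⊢; rw [h1]; decide
    simp only [h1, hne, if_true, if_false, Bool.false_eq_true]
    set rows := image.length
    set cols := (image.headD []).length
    set pad_r := kernel.length / 2
    set pad_c := (kernel.headD []).length / 2
    set ones := pvOnes kernel pad_r pad_c with hones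
    -- A's cell value in gather form
    have hAcell : ∀ i j : Nat,
        pvOuterA (fun ki => pvInnerA (fun kj =>
            (kernel.getD ki []).getD kj 0 == 1 &&
              !(((pvPadded image rows cols pad_r pad_c).getD (i+ki) []).getD (j+kj) 0 == 1))
          (List.range (kernel.headD []).length)) 1 0 (List.range kernel.length)
          = if ones.all (fun d => pvPx image rows cols ((i:Int) + d.1) ((j:Int) + d.2) == 1)
            then 1 else 0 := by
      intro i j
      rw [pvOuterA_eq]
      have hin := funext (fun ki => pvInnerA_eq_any (fun kj =>
          (kernel.getD ki []).getD kj 0 == 1 &&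
            !(((pvPadded image rows cols pad_r pad_c).getD (i+ki) []).getD (j+kj) 0 == 1))
        (List.range (kernel.headD []).length))
      rw [hin, erode_bool image kernel rows cols pad_r pad_c i j, ← hones]
      cases ones.all (fun d => pvPx image rows cols ((i:Int) + d.1) ((j:Int) + d.2) == 1) <;> rfl
    by_cases hz : ones = []
    · -- empty kernel support: A gives all ones; B returns the all-ones grid
      rw [if_pos hz]
      refine pvGrid_ext rows cols _ _
        (shape_mapgrid rows cols _ (fun _ _ => by simp))
        (shape_mapgrid rows cols _ (fun _ _ => List.length_replicate))
        (fun i hi j hj => ?_)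
      rw [cell_mapgrid rows cols _ i j hi, cell_maprow cols _ j hj,
        cell_mapgrid rows cols _ i j hi, cell_replrow cols 1 j hj, hAcell i j, hz]
      simp
    · rw [if_neg hz]
      refine pvGrid_ext rows cols _ _
        (shape_mapgrid rows cols _ (fun _ _ => by simp))
        (shape_scatter image rows cols ones _ 0 _
          (shape_mapgrid rows cols _ (fun _ _ => by simp)))
        (fun i hi j hj => ?_)
      rw [cell_mapgrid rows cols _ i j hi, cell_maprow cols _ j hj, hAcell i j,
        erode_cell image rows cols ones hz i j hi hj]
  · by_cases h2 : (operation == "dilate") = true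
    · simp only [h1, h2, if_true, if_false, Bool.false_eq_true]
      set rows := image.length
      set cols := (image.headD []).length
      set pad_r := kernel.length / 2
      set pad_c := (kernel.headD []).length / 2
      set ones := pvOnes kernel pad_r pad_c with hones
      refine pvGrid_ext rows cols _ _
        (shape_mapgrid rows cols _ (fun _ _ => by simp))
        (shape_scatter image rows cols ones _ 1 _
          (shape_mapgrid rows cols _ (fun _ _ => List.length_replicate)))
        (fun i hi j hj => ?_)
      rw [cell_mapgrid rows cols _ i j hi, cell_maprow cols _ j hj,
        dilate_cell image rows cols ones i j hi hj]
      rw [pvOuterA_eq]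
      have hin := funext (fun ki => pvInnerA_eq_any (fun kj =>
          (kernel.getD ki []).getD kj 0 == 1 &&
            (((pvPadded image rows cols pad_r pad_c).getD (i+ki) []).getD (j+kj) 0 == 1))
        (List.range (kernel.headD []).length))
      rw [hin, dilate_bool image kernel rows cols pad_r pad_c i j]
    · simp only [h1, h2, if_false, Bool.false_eq_true]
      refine List.map_congr_left (fun i _ => ?_)
      simp [List.map_const']

-- ===== VERDICT (by name: the statement is the Claim_ definition above) =====
theorem morphological_op_spec : Claim_equal_morphological_op := by
  intro image kernel operation _ _
  exact ports_agree image kernel operation
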